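-- pv_equiv track=rewrite | github.com/wizardlouis/Seq2seq-Model | LeakyRNN_11.28/gene_seq.py | fixedLen_seq
-- ===== SOURCE A (Python) =====
-- def fixedLen_seq(items,n):
--     if n==1:
--         return [[item] for item in items]
--     else:
--         fseq=[]
--         for item in items:
--             restitems=list(filter(lambda x:x!=item,items))
--             fseq.extend([[item]+seq for seq in fixedLen_seq(restitems,n-1)])
--         return fseq
-- ===== SOURCE B (Python) =====
-- def fixedLen_seq(items, n):
--     if n < 1:
--         return []
--     partials = [[x] for x in items]
--     for _ in range(n - 1):
--         if not partials:
--             break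
--         partials = [s + [x] for s in partials for x in items if x not in s]
--     return partials
-- ===== Notes on version B (the rewrite author's own statement) =====
-- stated objective: alternative
-- what changed: Replaces A's top-down recursion (fix a first item, recurse on the value-filtered rest) by an iterative bottom-up build: start from all length-1 sequences and extend every partial sequence by each not-yet-used value n-1 times.
import Mathlib
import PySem

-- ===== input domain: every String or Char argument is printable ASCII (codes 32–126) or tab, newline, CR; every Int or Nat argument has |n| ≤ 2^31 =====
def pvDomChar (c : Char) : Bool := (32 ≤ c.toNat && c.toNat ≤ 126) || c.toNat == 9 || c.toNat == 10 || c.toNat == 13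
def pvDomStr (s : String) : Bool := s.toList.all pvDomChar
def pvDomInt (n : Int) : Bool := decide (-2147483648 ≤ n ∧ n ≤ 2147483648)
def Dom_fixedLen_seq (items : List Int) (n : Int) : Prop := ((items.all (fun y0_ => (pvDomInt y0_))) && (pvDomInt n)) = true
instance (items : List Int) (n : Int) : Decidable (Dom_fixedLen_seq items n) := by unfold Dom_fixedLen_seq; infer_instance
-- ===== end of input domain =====

-- B replaces A's top-down recursion by an iterative bottom-up build of the partial
-- sequences (same output order and values); objective: alternative decomposition.

-- ===== PORT A =====
-- A's recursion always terminates (each recursive call filters at least the current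
-- item out of `items`); the fuel `items.length + 1` is a pure totalisation device
-- and is proved sufficient below (fixedLen_seqF is fuel-indifferent once fuel > |items|).
def fixedLen_seqF : Nat → List Int → Int → List (List Int)
  | 0, _, _ => []
  | f + 1, items, n =>
    if n == 1 then
      items.map (fun item => [item])
    else
      items.foldl
        (fun fseq item =>
          fseq ++ ((fixedLen_seqF f (items.filter (fun x => x != item)) (n - 1)).map
            (fun seq => item :: seq)))
        []

def fixedLen_seq (items : List Int) (n : Int) : List (List Int) :=
  fixedLen_seqF (items.length + 1) items n

-- ===== PORT B =====
-- one pass of the loop body: partials = [s + [x] for s in partials for x in items if x not in s]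
def pvStep (items : List Int) (partials : List (List Int)) : List (List Int) :=
  partials.flatMap (fun s => (items.filter (fun x => !(s.contains x))).map (fun x => s ++ [x]))

-- the 'for _ in range(n-1)' loop as structural recursion on the iteration count
def pvGrow (items : List Int) : Nat → List (List Int) → List (List Int)
  | 0, partials => partials
  | k + 1, partials =>
    if partials.isEmpty then partials
    else pvGrow items k (pvStep items partials)

def fixedLen_seq_alt (items : List Int) (n : Int) : List (List Int) :=
  if n < 1 then []
  else pvGrow items (n - 1).toNat (items.map (fun x => [x]))

-- ===== PRECONDITION & SPEC =====
def Spec_fixedLen_seq (items : List Int) (n : Int) (out : List (List Int)) : Prop := out = fixedLen_seq_alt items n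
instance (items : List Int) (n : Int) (out : List (List Int)) : Decidable (Spec_fixedLen_seq items n out) := by unfold Spec_fixedLen_seq; infer_instance

-- ===== CLAIM (what is proved, stated in full; the proofs are below) =====
def Claim_equal_fixedLen_seq : Prop := ∀ (items : List Int) (n : Int), Dom_fixedLen_seq items n → Spec_fixedLen_seq items n (fixedLen_seq items n)

-- ===== LEMMAS AND PROOFS =====

-- A returns [] for n ≤ 0 (the recursion bottoms out at empty items)
theorem fixedLen_seqF_nonpos : ∀ (f : Nat) (items : List Int) (n : Int), n ≤ 0 →
    fixedLen_seqF f items n = [] := by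
  intro f
  induction f with
  | zero => intro items n _; rfl
  | succ f ih =>
    intro items n hn
    have h1 : (n == 1) = false := by simp; omega
    rw [fixedLen_seqF, h1]
    simp only [Bool.false_eq_true, if_false]
    rw [PySem.List.foldl_append_eq_flatMap]
    simp only [List.nil_append, List.flatMap_eq_nil_iff]
    intro x _
    rw [ih _ (n - 1) (by omega)]
    rfl

theorem pvGrow_nil (items : List Int) : ∀ (k : Nat), pvGrow items k [] = [] := by
  intro k
  induction k with
  | zero => rfl
  | succ k ih => rw [pvGrow]; simp

-- the early break is semantically transparent: one step on [] yields [] anyway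
theorem pvGrow_succ (items : List Int) (k : Nat) (P : List (List Int)) :
    pvGrow items (k + 1) P = pvGrow items k (pvStep items P) := by
  cases P with
  | nil => rw [pvGrow]; simp [pvStep, pvGrow_nil]
  | cons a P => rw [pvGrow]; simp

theorem pvStep_append (items : List Int) (P Q : List (List Int)) :
    pvStep items (P ++ Q) = pvStep items P ++ pvStep items Q := by
  simp [pvStep]

theorem pvGrow_append (items : List Int) : ∀ (k : Nat) (P Q : List (List Int)),
    pvGrow items k (P ++ Q) = pvGrow items k P ++ pvGrow items k Q := by
  intro k
  induction k with
  | zero => intro P Q; rfl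
  | succ k ih => intro P Q; rw [pvGrow_succ, pvStep_append, ih, pvGrow_succ, pvGrow_succ]

theorem pvGrow_flatMap (items : List Int) (k : Nat) (l : List Int)
    (g : Int → List (List Int)) :
    pvGrow items k (l.flatMap g) = l.flatMap (fun a => pvGrow items k (g a)) := by
  induction l with
  | nil => simp [pvGrow_nil]
  | cons a l ih => simp only [List.flatMap_cons, pvGrow_append, ih]

theorem pvStep_map_cons (items : List Int) (x : Int) (P : List (List Int)) :
    pvStep items (P.map (fun s => x :: s)) =
      (pvStep (items.filter (fun y => y != x)) P).map (fun s => x :: s) := by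
  simp only [pvStep, List.flatMap_map, List.map_flatMap]
  apply List.flatMap_congr
  intro s _
  rw [List.map_map, List.filter_filter]
  have hfe : items.filter (fun y => !(x :: s).contains y)
      = items.filter (fun a => !s.contains a && a != x) := by
    apply List.filter_congr
    intro y _
    by_cases h : y = x <;> simp [Bool.and_comm, h]
  exact congrArg (List.map (fun y => (x :: s) ++ [y])) hfe

theorem pvGrow_map_cons (items : List Int) (x : Int) : ∀ (k : Nat) (P : List (List Int)),
    pvGrow items k (P.map (fun s => x :: s)) =
      (pvGrow (items.filter (fun y => y != x)) k P).map (fun s => x :: s) := by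
  intro k
  induction k with
  | zero => intro P; rfl
  | succ k ih => intro P; rw [pvGrow_succ, pvStep_map_cons, ih, pvGrow_succ]

theorem fixedLen_seqF_grow : ∀ (m f : Nat) (items : List Int) (n : Int),
    n = (m : Int) + 1 → items.length < f →
    fixedLen_seqF f items n = pvGrow items m (items.map (fun x => [x])) := by
  intro m
  induction m with
  | zero =>
    intro f items n hn hf
    cases f with
    | zero => omega
    | succ f =>
      have h1 : (n == 1) = true := by simp; omega
      rw [fixedLen_seqF, h1]
      rfl
  | succ k ih =>
    intro f items n hn hf
    cases f with
    | zero => omega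
    | succ f =>
      have h1 : (n == 1) = false := by simp; omega
      rw [fixedLen_seqF, h1]
      simp only [Bool.false_eq_true, if_false]
      rw [PySem.List.foldl_append_eq_flatMap, List.nil_append]
      -- right-hand side: unfold one pvGrow step and push it through the flatMap
      have hstep : pvStep items (items.map (fun x => [x])) =
          items.flatMap (fun x =>
            ((items.filter (fun y => y != x)).map (fun y => [y])).map (fun s => x :: s)) := by
        simp only [pvStep, List.flatMap_map, List.map_map]
        apply List.flatMap_congr
        intro x _
        have hfe : items.filter (fun y => !(([x]).contains y))
            = items.filter (fun y => y != x) := by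
          apply List.filter_congr
          intro y _
          by_cases h : y = x <;> simp [h]
        exact congrArg (List.map (fun y => [x] ++ [y])) hfe
      rw [pvGrow_succ, hstep, pvGrow_flatMap]
      apply List.flatMap_congr
      intro item hmem
      rw [pvGrow_map_cons]
      congr 1
      apply ih f (items.filter (fun y => y != item)) (n - 1) (by omega)
      have : (items.filter (fun y => y != item)).length < items.length := by
        apply List.length_filter_lt_length_iff_exists.mpr
        exact ⟨item, hmem, by simp⟩
      omega

-- ===== VERDICT (by name: the statement is the Claim_ definition above) =====
theorem fixedLen_seq_spec : Claim_equal_fixedLen_seq := by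
  intro items n _
  unfold Spec_fixedLen_seq fixedLen_seq fixedLen_seq_alt
  by_cases h : n < 1
  · rw [if_pos h, fixedLen_seqF_nonpos _ _ _ (by omega)]
  · rw [if_neg h]
    exact fixedLen_seqF_grow (n - 1).toNat _ items n (by omega) (by omega)
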